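-- pv_equiv track=rewrite | github.com/elahehaa/publication_classifier | utils.py | confusion_matrix_multiclass
-- ===== SOURCE A (Python) =====
-- def confusion_matrix_multiclass(y_true, y_pred):
--     cm = {'1': {'tp': 0, 'fp': 0, 'tn': 0, 'fn': 0},
--           '2': {'tp': 0, 'fp': 0, 'tn': 0, 'fn': 0},
--           '3': {'tp': 0, 'fp': 0, 'tn': 0, 'fn': 0},
--           }
--     for i in range(len(y_true)):
--         if y_true[i] == y_pred[i]:
--             if y_true[i] == 1:
--                 cm['1']['tp'] += 1
--             elif y_true[i] == 0:
--                 cm['1']['tn'] += 1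
--                 cm['2']['tn'] += 1
--                 cm['3']['tn'] += 1
--             elif y_true[i] == 2:
--                 cm['2']['tp'] += 1
--             else:
--                 cm['3']['tp'] += 1
--         elif y_true[i] != y_pred[i]:
--             if y_true[i] == 1:
--                 cm['1']['fn'] += 1
--             elif y_true[i] == 0:
--                 if y_pred[i] == 1:
--                     cm['1']['fp'] += 1
--                 elif y_pred[i] == 2:
--                     cm['2']['fp'] += 1
--                 elif y_pred[i] == 3:
--                     cm['3']['fp'] += 1
--             elif y_true[i] == 2:
--                 cm['2']['fn'] += 1
--             else:
--                 cm['3']['fn'] += 1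
--
--     return cm
-- ===== SOURCE B (Python) =====
-- def confusion_matrix_multiclass(y_true, y_pred):
--     # Phase 1: tally how often each (true, pred) pair occurs.
--     counts = {}
--     for i in range(len(y_true)):
--         pair = (y_true[i], y_pred[i])
--         counts[pair] = counts.get(pair, 0) + 1
--
--     # Phase 2: derive the matrix from the tallies.
--     # Label 0 is the negative class; 1 and 2 are their own classes,
--     # and 3 is the catch-all class for every other label.
--     def label(t):
--         return '1' if t == 1 else '2' if t == 2 else '3'
--
--     cm = {k: {'tp': 0, 'fp': 0, 'tn': counts.get((0, 0), 0), 'fn': 0}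
--           for k in ('1', '2', '3')}
--     for (t, p), n in counts.items():
--         if t == 0:
--             if p in (1, 2, 3):
--                 cm[str(p)]['fp'] += n
--         elif t == p:
--             cm[label(t)]['tp'] += n
--         else:
--             cm[label(t)]['fn'] += n
--     return cm
-- ===== Notes on version B (the rewrite author's own statement) =====
-- stated objective: alternative
-- what changed: A's per-sample branch cascade mutating the nested dict is replaced by two differently-shaped phases: one pass tallying a dict of (true, pred) pair frequencies, then an aggregate pass over the distinct pairs that adds each tally to its matrix cell (class 3 as the catch-all bucket, tn taken directly from the (0,0) tally).
import Mathlib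
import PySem

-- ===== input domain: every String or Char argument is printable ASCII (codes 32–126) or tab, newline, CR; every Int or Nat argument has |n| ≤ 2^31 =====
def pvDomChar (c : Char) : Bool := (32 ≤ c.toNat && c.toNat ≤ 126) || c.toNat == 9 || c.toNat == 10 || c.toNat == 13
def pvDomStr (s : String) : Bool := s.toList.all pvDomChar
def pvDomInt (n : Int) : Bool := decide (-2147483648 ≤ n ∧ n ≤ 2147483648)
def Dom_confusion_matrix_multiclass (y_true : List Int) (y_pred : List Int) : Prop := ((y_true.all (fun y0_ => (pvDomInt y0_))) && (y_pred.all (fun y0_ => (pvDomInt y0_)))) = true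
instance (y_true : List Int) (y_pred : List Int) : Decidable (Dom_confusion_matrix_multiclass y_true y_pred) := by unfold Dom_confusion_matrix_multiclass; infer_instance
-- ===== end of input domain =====

-- B replaces A's per-sample branch cascade on a nested dict by two phases: a tally dict
-- of (true, pred) pair frequencies, then an aggregate pass over the distinct pairs adding
-- each tally to its matrix cell (objective: alternative decomposition, same O(n) cost).


-- ===== PORT A =====
-- one loop iteration of A: dispatch on (t, p) = (y_true[i], y_pred[i]) and bump one
-- cell of the nested dict (Python's cm[k][c] += 1 is Dict.modify; the keys are always present)
def cmStepA (cm : PySem.Dict String (PySem.Dict String Int)) (t p : Int) :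
    PySem.Dict String (PySem.Dict String Int) :=
  if t == p then
    if t == 1 then cm.modify "1" PySem.Dict.empty (fun d => d.modify "tp" 0 (· + 1))
    else if t == 0 then
      ((cm.modify "1" PySem.Dict.empty (fun d => d.modify "tn" 0 (· + 1))).modify "2"
          PySem.Dict.empty (fun d => d.modify "tn" 0 (· + 1))).modify "3"
        PySem.Dict.empty (fun d => d.modify "tn" 0 (· + 1))
    else if t == 2 then cm.modify "2" PySem.Dict.empty (fun d => d.modify "tp" 0 (· + 1))
    else cm.modify "3" PySem.Dict.empty (fun d => d.modify "tp" 0 (· + 1))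
  else if !(t == p) then
    if t == 1 then cm.modify "1" PySem.Dict.empty (fun d => d.modify "fn" 0 (· + 1))
    else if t == 0 then
      if p == 1 then cm.modify "1" PySem.Dict.empty (fun d => d.modify "fp" 0 (· + 1))
      else if p == 2 then cm.modify "2" PySem.Dict.empty (fun d => d.modify "fp" 0 (· + 1))
      else if p == 3 then cm.modify "3" PySem.Dict.empty (fun d => d.modify "fp" 0 (· + 1))
      else cm
    else if t == 2 then cm.modify "2" PySem.Dict.empty (fun d => d.modify "fn" 0 (· + 1))
    else cm.modify "3" PySem.Dict.empty (fun d => d.modify "fn" 0 (· + 1))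
  else cm

-- pyGetD's default 0 is unreachable under Pre_ (every index is in range for both lists)
def confusion_matrix_multiclass (y_true : List Int) (y_pred : List Int) :
    List (String × List (String × Int)) :=
  let cm0 : PySem.Dict String (PySem.Dict String Int) :=
    PySem.Dict.ofList
      [("1", PySem.Dict.ofList [("tp", (0 : Int)), ("fp", 0), ("tn", 0), ("fn", 0)]),
       ("2", PySem.Dict.ofList [("tp", (0 : Int)), ("fp", 0), ("tn", 0), ("fn", 0)]),
       ("3", PySem.Dict.ofList [("tp", (0 : Int)), ("fp", 0), ("tn", 0), ("fn", 0)])]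
  let cm := (PySem.List.pyRange 0 (PySem.List.len y_true)).foldl
    (fun cm i => cmStepA cm (PySem.List.pyGetD y_true i 0) (PySem.List.pyGetD y_pred i 0)) cm0
  cm.items.map (fun kv => (kv.1, kv.2.items))

-- ===== PORT B =====
-- label(t): '1' if t == 1 else '2' if t == 2 else '3'
def cmLabelB (t : Int) : String :=
  if t == 1 then "1" else if t == 2 then "2" else "3"

-- the body of B's aggregate loop over counts.items(): one distinct (t, p) pair with its tally n
def cmStepB (cm : PySem.Dict String (PySem.Dict String Int)) (t p n : Int) :
    PySem.Dict String (PySem.Dict String Int) :=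
  if t == 0 then
    if p == 1 || p == 2 || p == 3 then  -- p in (1, 2, 3)
      cm.modify (PySem.Int.toStr p) PySem.Dict.empty (fun d => d.modify "fp" 0 (· + n))
    else cm
  else if t == p then cm.modify (cmLabelB t) PySem.Dict.empty (fun d => d.modify "tp" 0 (· + n))
  else cm.modify (cmLabelB t) PySem.Dict.empty (fun d => d.modify "fn" 0 (· + n))

def confusion_matrix_multiclass_alt (y_true : List Int) (y_pred : List Int) :
    List (String × List (String × Int)) :=
  -- phase 1: counts[pair] = counts.get(pair, 0) + 1 over range(len(y_true))
  let counts : PySem.Dict (Int × Int) Int :=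
    (PySem.List.pyRange 0 (PySem.List.len y_true)).foldl
      (fun d i =>
        let z := (PySem.List.pyGetD y_true i 0, PySem.List.pyGetD y_pred i 0)
        d.insert z (d.getD z 0 + 1))
      PySem.Dict.empty
  -- phase 2: the dict comprehension, then the aggregate loop over counts.items()
  let tn := counts.getD (0, 0) 0
  let cm0 : PySem.Dict String (PySem.Dict String Int) :=
    PySem.Dict.ofList
      [("1", PySem.Dict.ofList [("tp", (0 : Int)), ("fp", 0), ("tn", tn), ("fn", 0)]),
       ("2", PySem.Dict.ofList [("tp", (0 : Int)), ("fp", 0), ("tn", tn), ("fn", 0)]),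
       ("3", PySem.Dict.ofList [("tp", (0 : Int)), ("fp", 0), ("tn", tn), ("fn", 0)])]
  let cm := counts.items.foldl (fun cm zn => cmStepB cm zn.1.1 zn.1.2 zn.2) cm0
  cm.items.map (fun kv => (kv.1, kv.2.items))

-- ===== PRECONDITION & SPEC =====
-- A raises IndexError (y_pred[i]) when y_pred is shorter than y_true; exactly those inputs are excluded.
def Pre_confusion_matrix_multiclass (y_true : List Int) (y_pred : List Int) : Prop :=
  y_true.length ≤ y_pred.length
instance (y_true : List Int) (y_pred : List Int) : Decidable (Pre_confusion_matrix_multiclass y_true y_pred) := by unfold Pre_confusion_matrix_multiclass; infer_instance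

def pvWitness_confusion_matrix_multiclass : List Int × List Int :=
  ([1, 0, 2, 3, 0, 5], [1, 2, 2, 3, 0, 7])

def Spec_confusion_matrix_multiclass (y_true : List Int) (y_pred : List Int) (out : List (String × List (String × Int))) : Prop := out = confusion_matrix_multiclass_alt y_true y_pred
instance (y_true : List Int) (y_pred : List Int) (out : List (String × List (String × Int))) : Decidable (Spec_confusion_matrix_multiclass y_true y_pred out) := by unfold Spec_confusion_matrix_multiclass; infer_instance

-- ===== CLAIM (what is proved, stated in full; the proofs are below) =====
def Claim_equal_confusion_matrix_multiclass : Prop := ∀ (y_true : List Int) (y_pred : List Int), Dom_confusion_matrix_multiclass y_true y_pred → Pre_confusion_matrix_multiclass y_true y_pred → Spec_confusion_matrix_multiclass y_true y_pred (confusion_matrix_multiclass y_true y_pred)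

-- ===== LEMMAS AND PROOFS =====

-- the canonical shape of both loop states: ten counters, tn shared by the three classes
def mkD (tp1 fp1 fn1 tp2 fp2 fn2 tp3 fp3 fn3 tn : Int) :
    PySem.Dict String (PySem.Dict String Int) :=
  PySem.Dict.ofList
    [("1", PySem.Dict.ofList [("tp", tp1), ("fp", fp1), ("tn", tn), ("fn", fn1)]),
     ("2", PySem.Dict.ofList [("tp", tp2), ("fp", fp2), ("tn", tn), ("fn", fn2)]),
     ("3", PySem.Dict.ofList [("tp", tp3), ("fp", fp3), ("tn", tn), ("fn", fn3)])]

def chi (b : Bool) : Int := if b then 1 else 0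

-- one A-step on the canonical state bumps exactly the counter selected by A's branch conditions
set_option maxHeartbeats 1000000 in
lemma cmStepA_mkD (tp1 fp1 fn1 tp2 fp2 fn2 tp3 fp3 fn3 tn t p : Int) :
    cmStepA (mkD tp1 fp1 fn1 tp2 fp2 fn2 tp3 fp3 fn3 tn) t p =
      mkD (tp1 + chi (t == p && t == 1))
        (fp1 + chi (!(t == p) && !(t == 1) && t == 0 && p == 1))
        (fn1 + chi (!(t == p) && t == 1))
        (tp2 + chi (t == p && !(t == 1) && !(t == 0) && t == 2))
        (fp2 + chi (!(t == p) && !(t == 1) && t == 0 && !(p == 1) && p == 2))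
        (fn2 + chi (!(t == p) && !(t == 1) && !(t == 0) && t == 2))
        (tp3 + chi (t == p && !(t == 1) && !(t == 0) && !(t == 2)))
        (fp3 + chi (!(t == p) && !(t == 1) && t == 0 && !(p == 1) && !(p == 2) && p == 3))
        (fn3 + chi (!(t == p) && !(t == 1) && !(t == 0) && !(t == 2)))
        (tn + chi (t == p && !(t == 1) && t == 0)) := by
  unfold cmStepA
  split_ifs <;> (simp [chi, *]; try rfl)
  all_goals simp_all

-- A's whole loop, characterised: each counter is a count over the (true, pred) pairs
set_option maxHeartbeats 1000000 in
lemma foldA_mkD (zs : List (Int × Int)) :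
    zs.foldl (fun cm z => cmStepA cm z.1 z.2) (mkD 0 0 0 0 0 0 0 0 0 0) =
      mkD (zs.countP (fun z => z.1 == z.2 && z.1 == 1))
        (zs.countP (fun z => !(z.1 == z.2) && !(z.1 == 1) && z.1 == 0 && z.2 == 1))
        (zs.countP (fun z => !(z.1 == z.2) && z.1 == 1))
        (zs.countP (fun z => z.1 == z.2 && !(z.1 == 1) && !(z.1 == 0) && z.1 == 2))
        (zs.countP (fun z => !(z.1 == z.2) && !(z.1 == 1) && z.1 == 0 && !(z.2 == 1) && z.2 == 2))
        (zs.countP (fun z => !(z.1 == z.2) && !(z.1 == 1) && !(z.1 == 0) && z.1 == 2))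
        (zs.countP (fun z => z.1 == z.2 && !(z.1 == 1) && !(z.1 == 0) && !(z.1 == 2)))
        (zs.countP (fun z => !(z.1 == z.2) && !(z.1 == 1) && z.1 == 0 && !(z.2 == 1) && !(z.2 == 2) && z.2 == 3))
        (zs.countP (fun z => !(z.1 == z.2) && !(z.1 == 1) && !(z.1 == 0) && !(z.1 == 2)))
        (zs.countP (fun z => z.1 == z.2 && !(z.1 == 1) && z.1 == 0)) := by
  induction zs using List.reverseRecOn with
  | nil => rfl
  | append_singleton zs z ih =>
    rw [List.foldl_append, List.foldl_cons, List.foldl_nil, ih, cmStepA_mkD]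
    congr 1 <;>
      (simp only [chi, List.countP_append, List.countP_cons, List.countP_nil]; push_cast;
       split_ifs <;> omega)

-- one B-step on the canonical state adds the tally n to the cell selected by B's branches
set_option maxHeartbeats 1000000 in
lemma cmStepB_mkD (tp1 fp1 fn1 tp2 fp2 fn2 tp3 fp3 fn3 tn t p n : Int) :
    cmStepB (mkD tp1 fp1 fn1 tp2 fp2 fn2 tp3 fp3 fn3 tn) t p n =
      mkD (tp1 + n * chi (!(t == 0) && t == p && t == 1))
        (fp1 + n * chi (t == 0 && p == 1))
        (fn1 + n * chi (!(t == 0) && !(t == p) && t == 1))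
        (tp2 + n * chi (!(t == 0) && t == p && !(t == 1) && t == 2))
        (fp2 + n * chi (t == 0 && p == 2))
        (fn2 + n * chi (!(t == 0) && !(t == p) && !(t == 1) && t == 2))
        (tp3 + n * chi (!(t == 0) && t == p && !(t == 1) && !(t == 2)))
        (fp3 + n * chi (t == 0 && p == 3))
        (fn3 + n * chi (!(t == 0) && !(t == p) && !(t == 1) && !(t == 2)))
        tn := by
  unfold cmStepB cmLabelB
  split_ifs <;> (simp [chi, *]; try rfl)
  all_goals rename_i h1 hp
  all_goals first
    | (simp only [Bool.or_eq_true, beq_iff_eq] at hp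
       obtain (rfl | rfl) | rfl := hp <;> (rw [show PySem.Int.toStr _ = _ from rfl]; simp; try rfl))
    | (simp only [Bool.or_eq_true, beq_iff_eq, not_or] at hp
       simp [hp.1.1, hp.1.2, hp.2])

-- B's aggregate loop over any items list: each cell gains the tally-weighted count
set_option maxHeartbeats 1000000 in
lemma foldB_mkD (l : List ((Int × Int) × Int)) (tp1 fp1 fn1 tp2 fp2 fn2 tp3 fp3 fn3 tn : Int) :
    l.foldl (fun cm zn => cmStepB cm zn.1.1 zn.1.2 zn.2) (mkD tp1 fp1 fn1 tp2 fp2 fn2 tp3 fp3 fn3 tn) =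
      mkD (tp1 + (l.map (fun zn => zn.2 * chi (!(zn.1.1 == 0) && zn.1.1 == zn.1.2 && zn.1.1 == 1))).sum)
        (fp1 + (l.map (fun zn => zn.2 * chi (zn.1.1 == 0 && zn.1.2 == 1))).sum)
        (fn1 + (l.map (fun zn => zn.2 * chi (!(zn.1.1 == 0) && !(zn.1.1 == zn.1.2) && zn.1.1 == 1))).sum)
        (tp2 + (l.map (fun zn => zn.2 * chi (!(zn.1.1 == 0) && zn.1.1 == zn.1.2 && !(zn.1.1 == 1) && zn.1.1 == 2))).sum)
        (fp2 + (l.map (fun zn => zn.2 * chi (zn.1.1 == 0 && zn.1.2 == 2))).sum)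
        (fn2 + (l.map (fun zn => zn.2 * chi (!(zn.1.1 == 0) && !(zn.1.1 == zn.1.2) && !(zn.1.1 == 1) && zn.1.1 == 2))).sum)
        (tp3 + (l.map (fun zn => zn.2 * chi (!(zn.1.1 == 0) && zn.1.1 == zn.1.2 && !(zn.1.1 == 1) && !(zn.1.1 == 2)))).sum)
        (fp3 + (l.map (fun zn => zn.2 * chi (zn.1.1 == 0 && zn.1.2 == 3))).sum)
        (fn3 + (l.map (fun zn => zn.2 * chi (!(zn.1.1 == 0) && !(zn.1.1 == zn.1.2) && !(zn.1.1 == 1) && !(zn.1.1 == 2)))).sum)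
        tn := by
  induction l using List.reverseRecOn generalizing tp1 fp1 fn1 tp2 fp2 fn2 tp3 fp3 fn3 tn with
  | nil => simp
  | append_singleton l zn ih =>
    rw [List.foldl_append, List.foldl_cons, List.foldl_nil, ih, cmStepB_mkD]
    congr 1 <;> (simp only [List.map_append, List.sum_append, List.map_cons, List.map_nil,
      List.sum_cons, List.sum_nil]; ring)

lemma sum_map_delta {α : Type} [DecidableEq α] (l : List α) (z : α) (c : α → Int)
    (hnd : l.Nodup) (hz : z ∈ l) :
    (l.map (fun k => if k = z then c k else 0)).sum = c z := by
  induction l with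
  | nil => cases hz
  | cons a l ih =>
    rcases List.nodup_cons.1 hnd with ⟨ha, hnd'⟩
    rcases List.mem_cons.1 hz with h | h
    · subst h
      have hrest : (l.map (fun k => if k = z then c k else 0)).sum = 0 := by
        apply List.sum_eq_zero
        intro x hx
        rcases List.mem_map.1 hx with ⟨k, hk, rfl⟩
        rw [if_neg]
        rintro rfl; exact ha hk
      rw [List.map_cons, List.sum_cons, if_pos rfl, hrest, add_zero]
    · have hne : ¬ a = z := by rintro rfl; exact ha h
      rw [List.map_cons, List.sum_cons, if_neg hne, zero_add, ih hnd' h]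

lemma sum_map_add' {α : Type} (l : List α) (f g : α → Int) :
    (l.map (fun x => f x + g x)).sum = (l.map f).sum + (l.map g).sum := by
  induction l with
  | nil => simp
  | cons a l ih => simp [ih]; ring

lemma sum_count_chi (zs : List (Int × Int)) (pred : Int × Int → Bool) :
    ((PySem.Set.ofList zs).map (fun k => (zs.count k : Int) * chi (pred k))).sum
      = (zs.countP pred : Int) := by
  induction zs using List.reverseRecOn with
  | nil => simp [PySem.Set.ofList_nil]
  | append_singleton zs z ih =>
    rw [PySem.Set.ofList_append_singleton, List.countP_append]
    by_cases hz : z ∈ zs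
    · have hadd : PySem.Set.add (PySem.Set.ofList zs) z = PySem.Set.ofList zs := by
        simp [PySem.Set.add, (PySem.Set.mem_ofList zs z).2 hz]
      rw [hadd]
      have hcnt : ∀ k ∈ PySem.Set.ofList zs,
          ((zs ++ [z]).count k : Int) * chi (pred k)
            = (zs.count k : Int) * chi (pred k) + (if k = z then chi (pred k) else 0) := by
        intro k _
        rw [List.count_append]
        by_cases hk : k = z
        · subst hk
          rw [if_pos rfl, List.count_singleton]
          simp; ring
        · have h0 : [z].count k = 0 := by
            simp [List.count_singleton]; exact fun e => hk e.symm
          rw [h0, Nat.add_zero, if_neg hk, add_zero]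
      rw [List.map_congr_left hcnt,
          sum_map_add' _ _ (fun k => if k = z then chi (pred k) else 0), ih,
          sum_map_delta _ z _ (PySem.Set.nodup_ofList zs) ((PySem.Set.mem_ofList zs z).2 hz)]
      simp only [List.countP_cons, List.countP_nil, chi]
      push_cast; split_ifs <;> omega
    · have hadd : PySem.Set.add (PySem.Set.ofList zs) z = PySem.Set.ofList zs ++ [z] := by
        simp [PySem.Set.add, PySem.Set.mem_ofList, hz]
      rw [hadd, List.map_append, List.sum_append]
      have hcnt : ∀ k ∈ PySem.Set.ofList zs,
          ((zs ++ [z]).count k : Int) * chi (pred k) = (zs.count k : Int) * chi (pred k) := by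
        intro k hk
        have hkz : ¬ k = z := by rintro rfl; exact hz ((PySem.Set.mem_ofList zs k).1 hk)
        have h0 : [z].count k = 0 := by
          simp [List.count_singleton]; exact fun e => hkz e.symm
        rw [List.count_append, h0, Nat.add_zero]
      have hz0 : zs.count z = 0 := List.count_eq_zero.2 hz
      rw [List.map_congr_left hcnt, ih]
      simp only [List.map_cons, List.map_nil, List.sum_cons, List.sum_nil,
        List.count_append, hz0, List.count_singleton, List.countP_cons, List.countP_nil, chi]
      push_cast; split_ifs <;> simp_all

-- the (0, 0) tally read off the counter is the plain count of exact (0, 0) pairs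
lemma count_pair_eq_countP (zs : List (Int × Int)) :
    (zs.count ((0 : Int), (0 : Int)) : Int) = (zs.countP (fun z => z.1 == 0 && z.2 == 0) : Int) := by
  have h : zs.countP (fun z => z == ((0 : Int), (0 : Int))) = zs.countP (fun z => z.1 == 0 && z.2 == 0) :=
    List.countP_congr (fun z _ => by
      obtain ⟨a, b⟩ := z; by_cases h1 : a = 0 <;> by_cases h2 : b = 0 <;> simp [h1, h2])
  rw [List.count_eq_countP, h]

-- under Pre_, indexing both lists at i ∈ range(len(y_true)) is indexing their zip
lemma pairs_body_eq (y_true y_pred : List Int)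
    (h : y_true.length ≤ y_pred.length) (i : Int)
    (hi : i ∈ PySem.List.pyRange 0 (PySem.List.len y_true)) :
    (PySem.List.pyGetD y_true i 0, PySem.List.pyGetD y_pred i 0) =
      PySem.List.pyGetD (y_true.zip y_pred) i (0, 0) := by
  rw [PySem.List.mem_pyRange_one] at hi
  have hlen : (y_true.zip y_pred).length = y_true.length := by
    simp [List.length_zip]; omega
  have h1 : i < (y_true.length : Int) := by
    simpa [PySem.List.len] using hi.2
  rw [PySem.List.pyGetD_eq_getElem y_true 0 hi.1 h1,
      PySem.List.pyGetD_eq_getElem y_pred 0 hi.1 (by omega),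
      PySem.List.pyGetD_eq_getElem (y_true.zip y_pred) (0, 0) hi.1 (by rw [hlen]; exact h1)]
  rw [List.getElem_zip]

lemma len_eq_len_zip (y_true y_pred : List Int) (h : y_true.length ≤ y_pred.length) :
    PySem.List.len y_true = PySem.List.len (y_true.zip y_pred) := by
  simp [PySem.List.len, List.length_zip]; omega

-- each of A's branch predicates agrees pointwise with B's cell predicate
lemma countP_q1 (zs : List (Int × Int)) : zs.countP (fun z => z.1 == z.2 && z.1 == 1) = zs.countP (fun z => !(z.1 == 0) && z.1 == z.2 && z.1 == 1) := List.countP_congr (fun z _ => by simp only [Bool.and_eq_true, Bool.not_eq_true', beq_eq_false_iff_ne, ne_eq, beq_iff_eq]; omega)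
lemma countP_q2 (zs : List (Int × Int)) : zs.countP (fun z => !(z.1 == z.2) && !(z.1 == 1) && z.1 == 0 && z.2 == 1) = zs.countP (fun z => z.1 == 0 && z.2 == 1) := List.countP_congr (fun z _ => by simp only [Bool.and_eq_true, Bool.not_eq_true', beq_eq_false_iff_ne, ne_eq, beq_iff_eq]; omega)
lemma countP_q3 (zs : List (Int × Int)) : zs.countP (fun z => !(z.1 == z.2) && z.1 == 1) = zs.countP (fun z => !(z.1 == 0) && !(z.1 == z.2) && z.1 == 1) := List.countP_congr (fun z _ => by simp only [Bool.and_eq_true, Bool.not_eq_true', beq_eq_false_iff_ne, ne_eq, beq_iff_eq]; omega)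
lemma countP_q4 (zs : List (Int × Int)) : zs.countP (fun z => z.1 == z.2 && !(z.1 == 1) && !(z.1 == 0) && z.1 == 2) = zs.countP (fun z => !(z.1 == 0) && z.1 == z.2 && !(z.1 == 1) && z.1 == 2) := List.countP_congr (fun z _ => by simp only [Bool.and_eq_true, Bool.not_eq_true', beq_eq_false_iff_ne, ne_eq, beq_iff_eq]; omega)
lemma countP_q5 (zs : List (Int × Int)) : zs.countP (fun z => !(z.1 == z.2) && !(z.1 == 1) && z.1 == 0 && !(z.2 == 1) && z.2 == 2) = zs.countP (fun z => z.1 == 0 && z.2 == 2) := List.countP_congr (fun z _ => by simp only [Bool.and_eq_true, Bool.not_eq_true', beq_eq_false_iff_ne, ne_eq, beq_iff_eq]; omega)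
lemma countP_q6 (zs : List (Int × Int)) : zs.countP (fun z => !(z.1 == z.2) && !(z.1 == 1) && !(z.1 == 0) && z.1 == 2) = zs.countP (fun z => !(z.1 == 0) && !(z.1 == z.2) && !(z.1 == 1) && z.1 == 2) := List.countP_congr (fun z _ => by simp only [Bool.and_eq_true, Bool.not_eq_true', beq_eq_false_iff_ne, ne_eq, beq_iff_eq]; omega)
lemma countP_q7 (zs : List (Int × Int)) : zs.countP (fun z => z.1 == z.2 && !(z.1 == 1) && !(z.1 == 0) && !(z.1 == 2)) = zs.countP (fun z => !(z.1 == 0) && z.1 == z.2 && !(z.1 == 1) && !(z.1 == 2)) := List.countP_congr (fun z _ => by simp only [Bool.and_eq_true, Bool.not_eq_true', beq_eq_false_iff_ne, ne_eq, beq_iff_eq]; omega)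
lemma countP_q8 (zs : List (Int × Int)) : zs.countP (fun z => !(z.1 == z.2) && !(z.1 == 1) && z.1 == 0 && !(z.2 == 1) && !(z.2 == 2) && z.2 == 3) = zs.countP (fun z => z.1 == 0 && z.2 == 3) := List.countP_congr (fun z _ => by simp only [Bool.and_eq_true, Bool.not_eq_true', beq_eq_false_iff_ne, ne_eq, beq_iff_eq]; omega)
lemma countP_q9 (zs : List (Int × Int)) : zs.countP (fun z => !(z.1 == z.2) && !(z.1 == 1) && !(z.1 == 0) && !(z.1 == 2)) = zs.countP (fun z => !(z.1 == 0) && !(z.1 == z.2) && !(z.1 == 1) && !(z.1 == 2)) := List.countP_congr (fun z _ => by simp only [Bool.and_eq_true, Bool.not_eq_true', beq_eq_false_iff_ne, ne_eq]; omega)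
lemma countP_q10 (zs : List (Int × Int)) : zs.countP (fun z => z.1 == z.2 && !(z.1 == 1) && z.1 == 0) = zs.countP (fun z => z.1 == 0 && z.2 == 0) := List.countP_congr (fun z _ => by simp only [Bool.and_eq_true, Bool.not_eq_true', beq_eq_false_iff_ne, ne_eq, beq_iff_eq]; omega)

-- ===== VERDICT (by name: the statement is the Claim_ definition above) =====
theorem confusion_matrix_multiclass_spec : Claim_equal_confusion_matrix_multiclass := by
  intro y_true y_pred _ hpre
  unfold Spec_confusion_matrix_multiclass
  unfold confusion_matrix_multiclass confusion_matrix_multiclass_alt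
  -- A's loop over indices is a fold over the zip
  have hcongA : ∀ (cm : PySem.Dict String (PySem.Dict String Int)) (i : Int),
      i ∈ PySem.List.pyRange 0 (PySem.List.len y_true) →
      cmStepA cm (PySem.List.pyGetD y_true i 0) (PySem.List.pyGetD y_pred i 0) =
      (fun cm i => cmStepA cm (PySem.List.pyGetD (y_true.zip y_pred) i (0, 0)).1
        (PySem.List.pyGetD (y_true.zip y_pred) i (0, 0)).2) cm i := by
    intro cm i hi
    show _ = cmStepA cm (PySem.List.pyGetD (y_true.zip y_pred) i (0, 0)).1
      (PySem.List.pyGetD (y_true.zip y_pred) i (0, 0)).2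
    rw [← pairs_body_eq y_true y_pred hpre i hi]
  have ha : ((PySem.List.pyRange 0 (PySem.List.len y_true)).foldl
      (fun cm i => cmStepA cm (PySem.List.pyGetD y_true i 0) (PySem.List.pyGetD y_pred i 0))
      (PySem.Dict.ofList
        [("1", PySem.Dict.ofList [("tp", (0 : Int)), ("fp", 0), ("tn", 0), ("fn", 0)]),
         ("2", PySem.Dict.ofList [("tp", (0 : Int)), ("fp", 0), ("tn", 0), ("fn", 0)]),
         ("3", PySem.Dict.ofList [("tp", (0 : Int)), ("fp", 0), ("tn", 0), ("fn", 0)])])) =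
      (y_true.zip y_pred).foldl (fun cm z => cmStepA cm z.1 z.2) (mkD 0 0 0 0 0 0 0 0 0 0) := by
    rw [PySem.List.foldl_congr_mem _ _ _ _ hcongA, len_eq_len_zip y_true y_pred hpre]
    exact PySem.List.foldl_pyRange_pyGetD (y_true.zip y_pred) (0, 0)
      (fun cm z => cmStepA cm z.1 z.2) _ le_rfl
  -- B's tally loop over indices is the Counter of the zip
  have hcongB : ∀ (d : PySem.Dict (Int × Int) Int) (i : Int),
      i ∈ PySem.List.pyRange 0 (PySem.List.len y_true) →
      (let z := (PySem.List.pyGetD y_true i 0, PySem.List.pyGetD y_pred i 0)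
       d.insert z (d.getD z 0 + 1)) =
      (fun d i => (fun (d : PySem.Dict (Int × Int) Int) (z : Int × Int) =>
        d.insert z (d.getD z 0 + 1)) d (PySem.List.pyGetD (y_true.zip y_pred) i ((0 : Int), (0 : Int)))) d i := by
    intro d i hi
    show (let z := (PySem.List.pyGetD y_true i 0, PySem.List.pyGetD y_pred i 0)
          d.insert z (d.getD z 0 + 1)) = _
    rw [pairs_body_eq y_true y_pred hpre i hi]
  have hb : ((PySem.List.pyRange 0 (PySem.List.len y_true)).foldl
      (fun d i =>
        let z := (PySem.List.pyGetD y_true i 0, PySem.List.pyGetD y_pred i 0)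
        d.insert z (d.getD z 0 + 1)) PySem.Dict.empty) =
      PySem.Dict.counter (y_true.zip y_pred) := by
    rw [PySem.List.foldl_congr_mem _ _ _ _ hcongB, len_eq_len_zip y_true y_pred hpre]
    exact (PySem.List.foldl_pyRange_pyGetD (y_true.zip y_pred) (0, 0)
      (fun (d : PySem.Dict (Int × Int) Int) (z : Int × Int) =>
        d.insert z (d.getD z 0 + 1)) _ le_rfl).trans
      (PySem.Dict.foldl_insert_getD_add_one_eq_counter (y_true.zip y_pred))
  simp only [ha, hb, foldA_mkD, PySem.Dict.getD_counter, PySem.Dict.items_counter]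
  rw [show (PySem.Dict.ofList
      [("1", PySem.Dict.ofList [("tp", (0 : Int)), ("fp", 0), ("tn", ((y_true.zip y_pred).count (0, 0) : Int)), ("fn", 0)]),
       ("2", PySem.Dict.ofList [("tp", (0 : Int)), ("fp", 0), ("tn", ((y_true.zip y_pred).count (0, 0) : Int)), ("fn", 0)]),
       ("3", PySem.Dict.ofList [("tp", (0 : Int)), ("fp", 0), ("tn", ((y_true.zip y_pred).count (0, 0) : Int)), ("fn", 0)])]) =
      mkD 0 0 0 0 0 0 0 0 0 ((y_true.zip y_pred).count (0, 0) : Int) from rfl]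
  rw [foldB_mkD]
  simp only [List.map_map, Function.comp_def]
  rw [sum_count_chi, sum_count_chi, sum_count_chi, sum_count_chi, sum_count_chi,
      sum_count_chi, sum_count_chi, sum_count_chi, sum_count_chi]
  rw [count_pair_eq_countP]
  simp only [countP_q1, countP_q2, countP_q3, countP_q4, countP_q5, countP_q6, countP_q7,
    countP_q8, countP_q9, countP_q10]
  simp [mkD]
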